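-- pv_equiv track=rewrite | github.com/ljm0850/algo-problem | 3711 학번.py | solution
-- ===== SOURCE A (Python) =====
-- def solution(ls:list[int])->int:
--     value = 1
--     while True:
--         temp = set()
--         for st in ls:
--             now = st % value
--             if now in temp:
--                 break
--             temp.add(now)
--         else:
--             return value
--         value += 1
-- ===== SOURCE B (Python) =====
-- def solution(ls: list[int]) -> int:
--     # collide mod v iff v divides a pairwise difference: precompute differences once
--     diffs = [abs(x - y) for i, x in enumerate(ls) for y in ls[i + 1:]]
--     value = 1
--     while True:
--         if all(d % value for d in diffs):
--             return value
--         value += 1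
-- ===== Notes on version B (the rewrite author's own statement) =====
-- stated objective: alternative
-- what changed: B precomputes the multiset of pairwise absolute differences once and returns the first modulus that divides none of them (collision mod v iff v divides a difference), replacing A's per-candidate residue-set construction and membership tests.
import Mathlib
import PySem

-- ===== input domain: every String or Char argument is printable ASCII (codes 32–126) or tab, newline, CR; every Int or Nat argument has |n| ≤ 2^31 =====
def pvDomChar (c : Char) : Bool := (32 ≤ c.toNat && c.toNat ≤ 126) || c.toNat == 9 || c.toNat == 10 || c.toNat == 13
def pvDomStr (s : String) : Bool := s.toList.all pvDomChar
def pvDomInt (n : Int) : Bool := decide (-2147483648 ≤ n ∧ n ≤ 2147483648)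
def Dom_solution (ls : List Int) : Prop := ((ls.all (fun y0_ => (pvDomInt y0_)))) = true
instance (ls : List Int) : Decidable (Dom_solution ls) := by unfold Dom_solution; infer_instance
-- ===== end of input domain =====

-- B replaces A's per-candidate residue-set check by a one-off list of pairwise differences
-- and a divisibility test per candidate (alternative decomposition; not faster).

-- ===== PORT A =====
-- fuel bound for the unbounded 'while True': for a duplicate-free list the loop returns by
-- value = 2*max|x|+1 at the latest; on lists with duplicates Python diverges and both
-- ports return 0 there, so equivalence holds unconditionally.
def pvFuel (ls : List Int) : Nat := 2 * (ls.foldl (fun a x => max a x.natAbs) 0) + 1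

-- inner 'for st in ls: … else: return value' pass of A: residues all fresh?
def pvCheckA (value : Int) : List Int → PySem.Set Int → Bool
  | [], _ => true
  | st :: rest, temp =>
      let now := PySem.Int.mod st value
      if PySem.Set.contains temp now then false
      else pvCheckA value rest (PySem.Set.add temp now)

def pvLoopA (ls : List Int) : Nat → Int → Int
  | 0, _ => 0
  | f + 1, value => if pvCheckA value ls PySem.Set.empty then value else pvLoopA ls f (value + 1)

def solution (ls : List Int) : Int := pvLoopA ls (pvFuel ls) 1

-- ===== PORT B =====
-- diffs = [abs(x - y) for i, x in enumerate(ls) for y in ls[i+1:]]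
def pvDiffs : List Int → List Int
  | [] => []
  | x :: rest => rest.map (fun y => ((x - y).natAbs : Int)) ++ pvDiffs rest

def pvLoopB (diffs : List Int) : Nat → Int → Int
  | 0, _ => 0
  | f + 1, value =>
      if diffs.all (fun d => PySem.Int.mod d value != 0) then value
      else pvLoopB diffs f (value + 1)

def solution_alt (ls : List Int) : Int := pvLoopB (pvDiffs ls) (pvFuel ls) 1

-- ===== PRECONDITION & SPEC =====
def Spec_solution (ls : List Int) (out : Int) : Prop := out = solution_alt ls
instance (ls : List Int) (out : Int) : Decidable (Spec_solution ls out) := by unfold Spec_solution; infer_instance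

-- ===== CLAIM (what is proved, stated in full; the proofs are below) =====
def Claim_equal_solution : Prop := ∀ (ls : List Int), Dom_solution ls → Spec_solution ls (solution ls)

-- ===== LEMMAS AND PROOFS =====

-- residues equal mod v (v > 0) iff v divides the difference
theorem pv_mod_eq_iff (x y v : Int) (hv : 0 < v) :
    PySem.Int.mod x v = PySem.Int.mod y v ↔ v ∣ (x - y) := by
  rw [PySem.Int.mod_eq_emod_of_pos hv, PySem.Int.mod_eq_emod_of_pos hv,
      Int.emod_eq_emod_iff_emod_sub_eq_zero]
  exact ⟨Int.dvd_of_emod_eq_zero, Int.emod_eq_zero_of_dvd⟩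

-- A's inner pass: true iff residues are pairwise distinct and miss temp
theorem pvCheckA_iff (v : Int) (ls : List Int) (temp : PySem.Set Int) :
    pvCheckA v ls temp = true ↔
      ((ls.map (fun x => PySem.Int.mod x v)).Nodup ∧
       ∀ x ∈ ls, PySem.Int.mod x v ∉ temp) := by
  induction ls generalizing temp with
  | nil => simp [pvCheckA]
  | cons st rest ih =>
    simp only [pvCheckA]
    by_cases h : PySem.Int.mod st v ∈ temp
    · rw [if_pos ((PySem.Set.contains_iff temp _).mpr h)]
      simp only [Bool.false_eq_true, false_iff, not_and, List.mem_cons]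
      intro _ h2
      exact absurd h (h2 st (Or.inl rfl))
    · rw [if_neg (by simp [h])]
      rw [ih]
      simp only [List.map_cons, List.nodup_cons, List.mem_cons, List.mem_map]
      constructor
      · rintro ⟨hnd, hout⟩
        refine ⟨⟨?_, hnd⟩, ?_⟩
        · rintro ⟨y, hy, hye⟩
          exact absurd ((PySem.Set.mem_add _ _ _).mpr (Or.inr hye)) (hout y hy)
        · rintro x (rfl | hx)
          · exact h
          · exact fun hc => (hout x hx) ((PySem.Set.mem_add temp _ _).mpr (Or.inl hc))
      · rintro ⟨⟨hfresh, hnd⟩, hout⟩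
        refine ⟨hnd, fun x hx hc => ?_⟩
        rcases (PySem.Set.mem_add temp _ _).mp hc with hc | hc
        · exact (hout x (Or.inr hx)) hc
        · exact hfresh ⟨x, hx, hc⟩

-- B's test: no pairwise difference divisible by v iff residues pairwise distinct (v > 0)
theorem pvDiffs_all_iff (v : Int) (hv : 0 < v) (ls : List Int) :
    ((pvDiffs ls).all (fun d => PySem.Int.mod d v != 0)) = true ↔
      (ls.map (fun x => PySem.Int.mod x v)).Nodup := by
  induction ls with
  | nil => simp [pvDiffs]
  | cons x rest ih =>
    simp only [pvDiffs, List.all_append, Bool.and_eq_true, ih,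
      List.map_cons, List.nodup_cons, List.all_eq_true, List.mem_map]
    constructor
    · rintro ⟨hfst, hrest⟩
      refine ⟨?_, hrest⟩
      rintro ⟨y, hy, hye⟩
      have := hfst _ ⟨y, hy, rfl⟩
      rw [bne_iff_ne, ne_eq, PySem.Int.mod_eq_zero_iff_dvd, Int.dvd_natAbs] at this
      exact this ((pv_mod_eq_iff x y v hv).mp hye.symm)
    · rintro ⟨hfresh, hrest⟩
      refine ⟨?_, hrest⟩
      rintro d ⟨y, hy, rfl⟩
      rw [bne_iff_ne, ne_eq, PySem.Int.mod_eq_zero_iff_dvd, Int.dvd_natAbs]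
      intro hdvd
      exact hfresh ⟨y, hy, ((pv_mod_eq_iff x y v hv).mpr hdvd).symm⟩

theorem pvLoop_eq (ls : List Int) (f : Nat) (v : Int) (hv : 0 < v) :
    pvLoopA ls f v = pvLoopB (pvDiffs ls) f v := by
  induction f generalizing v with
  | zero => rfl
  | succ f ih =>
    simp only [pvLoopA, pvLoopB]
    have hA := pvCheckA_iff v ls PySem.Set.empty
    simp only [PySem.Set.empty, List.not_mem_nil, not_false_iff, implies_true, and_true] at hA
    have hcond : pvCheckA v ls PySem.Set.empty =
        ((pvDiffs ls).all (fun d => PySem.Int.mod d v != 0)) :=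
      Bool.eq_iff_iff.mpr (hA.trans (pvDiffs_all_iff v hv ls).symm)
    rw [hcond]
    split
    · rfl
    · exact ih (v + 1) (by omega)

-- ===== VERDICT (by name: the statement is the Claim_ definition above) =====
theorem solution_spec : Claim_equal_solution := by
  intro ls _
  unfold Spec_solution solution solution_alt
  exact pvLoop_eq ls (pvFuel ls) 1 (by norm_num)
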